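-- pv_equiv track=rewrite | github.com/rsb-23/vobjectx | vobjectx/ical/ical_helper.py | string_to_text_values
-- ===== SOURCE A (Python) =====
-- ESCAPABLE_CHAR_LIST = '\\;,Nn"'
--
-- def string_to_text_values(s: str, list_separator: str = ",", char_list: str = ESCAPABLE_CHAR_LIST) -> list[str]:
--     def escaped_char(ch: str) -> str:
--         if ch not in char_list:
--             # leave unrecognized escaped characters for later passes
--             return "\\" + ch
--         return "\n" if ch in "nN" else ch
--
--     current = []
--     results = []
--     to_escape = False
--     for char in s:
--         if to_escape:
--             current.append(escaped_char(char))
--             to_escape = False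
--             continue
--
--         if char == "\\":
--             to_escape = True
--         elif char == list_separator:
--             current = "".join(current)
--             results.append(current)
--             current = []
--         else:
--             current.append(char)
--
--     if current or not results:
--         current = "".join(current)
--         results.append(current)
--     return results
-- ===== SOURCE B (Python) =====
-- ESCAPABLE_CHAR_LIST = '\\;,Nn"'
--
-- def string_to_text_values(s: str, list_separator: str = ",", char_list: str = ESCAPABLE_CHAR_LIST) -> list[str]:
--     # Phase 1: split into raw (still escaped) segments at unescaped separators.
--     segs = []
--     cur = []
--     i = 0
--     n = len(s)
--     while i < n:
--         c = s[i]
--         if c == "\\":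
--             cur += s[i:i + 2]
--             i += 2
--         elif c == list_separator:
--             segs.append("".join(cur))
--             cur = []
--             i += 1
--         else:
--             cur.append(c)
--             i += 1
--
--     # Phase 2: decode escapes within one raw segment.
--     def decode(seg: str) -> str:
--         out = []
--         j = 0
--         m = len(seg)
--         while j < m:
--             ch = seg[j]
--             if ch == "\\":
--                 if j + 1 < m:
--                     nxt = seg[j + 1]
--                     if nxt in char_list:
--                         out.append("\n" if nxt in "nN" else nxt)
--                     else:
--                         out.append("\\" + nxt)
--                 # a dangling trailing backslash decodes to nothing
--                 j += 2
--             else: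
--                 out.append(ch)
--                 j += 1
--         return "".join(out)
--
--     results = [decode(x) for x in segs]
--     last = decode("".join(cur))
--     if last or not results:
--         results.append(last)
--     return results
-- ===== Notes on version B (the rewrite author's own statement) =====
-- stated objective: alternative
-- what changed: A's single scan with a to_escape flag and mixed split/decode state is replaced by two independent phases: first split the string into raw segments at unescaped separators (consuming backslash pairs whole), then decode escape sequences in each segment separately.
import Mathlib
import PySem

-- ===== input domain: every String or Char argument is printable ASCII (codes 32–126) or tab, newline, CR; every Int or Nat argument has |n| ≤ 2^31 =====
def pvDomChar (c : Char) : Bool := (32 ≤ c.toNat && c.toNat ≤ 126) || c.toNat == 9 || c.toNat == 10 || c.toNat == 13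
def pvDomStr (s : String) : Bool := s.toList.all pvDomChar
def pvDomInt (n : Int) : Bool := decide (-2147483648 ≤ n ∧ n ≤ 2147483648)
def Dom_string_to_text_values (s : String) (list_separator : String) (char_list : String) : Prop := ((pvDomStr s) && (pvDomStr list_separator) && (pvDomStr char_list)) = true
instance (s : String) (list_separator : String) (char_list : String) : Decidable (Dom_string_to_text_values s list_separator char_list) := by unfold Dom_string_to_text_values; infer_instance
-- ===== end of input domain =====

-- B rewrites A's single stateful scan (escape flag carried across the loop) as two independent
-- phases: split into raw segments at unescaped separators, then decode each segment; objective: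
-- alternative decomposition, same cost.

-- ===== PORT A =====
-- escaped_char: strings modelled at character level (the list of chars of the 1–2 char string)
def pvEscA (cl : List Char) (c : Char) : List Char :=
  if cl.contains c = false then ['\\', c]
  else if ("nN".toList.contains c) then ['\n'] else [c]

-- the for-loop: state = (current : list of joined-later pieces, results, to_escape)
def pvLoopA (sep cl : List Char) : List Char → List (List Char) → List String → Bool → List String
  | [], cur, res, _ =>
    -- "if current or not results: results.append(''.join(current))"
    if cur ≠ [] ∨ res = [] then res ++ [String.ofList cur.flatten] else res
  | c :: cs, cur, res, esc =>
    if esc then pvLoopA sep cl cs (cur ++ [pvEscA cl c]) res false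
    else if c = '\\' then pvLoopA sep cl cs cur res true
    else if [c] = sep then pvLoopA sep cl cs [] (res ++ [String.ofList cur.flatten]) false
    else pvLoopA sep cl cs (cur ++ [[c]]) res false

def string_to_text_values (s : String) (list_separator : String) (char_list : String) : List String :=
  pvLoopA list_separator.toList char_list.toList s.toList [] [] false

-- ===== PORT B =====
-- phase 1: split into raw (still escaped) segments at unescaped separators
def pvSplitB (sep : List Char) : List Char → List Char → List (List Char) → List (List Char) × List Char
  | [], cur, segs => (segs, cur)
  | c :: cs, cur, segs =>
    if c = '\\' then
      match cs with
      | [] => pvSplitB sep [] (cur ++ [c]) segs          -- s[i:i+2] is just "\"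
      | d :: cs' => pvSplitB sep cs' (cur ++ [c, d]) segs
    else if [c] = sep then pvSplitB sep cs [] (segs ++ [cur])
    else pvSplitB sep cs (cur ++ [c]) segs

-- phase 2: decode escapes within one raw segment
def pvDecodeB (cl : List Char) : List Char → List Char
  | [] => []
  | c :: cs =>
    if c = '\\' then
      match cs with
      | [] => []                                          -- dangling trailing backslash: nothing
      | d :: cs' =>
        (if cl.contains d then (if ("nN".toList.contains d) then ['\n'] else [d])
         else ['\\', d]) ++ pvDecodeB cl cs'
    else c :: pvDecodeB cl cs

def string_to_text_values_alt (s : String) (list_separator : String) (char_list : String) : List String :=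
  let p := pvSplitB list_separator.toList s.toList [] []
  let results := p.1.map (fun seg => String.ofList (pvDecodeB char_list.toList seg))
  let last := String.ofList (pvDecodeB char_list.toList p.2)
  if last ≠ "" ∨ results = [] then results ++ [last] else results

-- ===== PRECONDITION & SPEC =====
def Spec_string_to_text_values (s : String) (list_separator : String) (char_list : String) (out : List String) : Prop := out = string_to_text_values_alt s list_separator char_list
instance (s : String) (list_separator : String) (char_list : String) (out : List String) : Decidable (Spec_string_to_text_values s list_separator char_list out) := by unfold Spec_string_to_text_values; infer_instance

-- ===== CLAIM (what is proved, stated in full; the proofs are below) =====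
def Claim_equal_string_to_text_values : Prop := ∀ (s : String) (list_separator : String) (char_list : String), Dom_string_to_text_values s list_separator char_list → Spec_string_to_text_values s list_separator char_list (string_to_text_values s list_separator char_list)

-- ===== LEMMAS AND PROOFS =====

-- B's finishing step, as a function of phase 1's result
def pvOutB (cl : List Char) (p : List (List Char) × List Char) : List String :=
  let results := p.1.map (fun seg => String.ofList (pvDecodeB cl seg))
  let last := String.ofList (pvDecodeB cl p.2)
  if last ≠ "" ∨ results = [] then results ++ [last] else results

lemma pvDec_nil (cl : List Char) : pvDecodeB cl [] = [] := rfl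

lemma pvDec_esc (cl : List Char) (d : Char) (t : List Char) :
    pvDecodeB cl ('\\' :: d :: t) = pvEscA cl d ++ pvDecodeB cl t := by
  cases h : cl.contains d <;> simp [pvDecodeB, pvEscA, h]

lemma pvDec_cons (cl : List Char) (c : Char) (t : List Char) (hc : c ≠ '\\') :
    pvDecodeB cl (c :: t) = c :: pvDecodeB cl t := by
  cases t <;> simp [pvDecodeB, hc]

lemma pvEscA_ne (cl : List Char) (d : Char) : pvEscA cl d ≠ [] := by
  unfold pvEscA
  split
  · simp
  · split <;> simp

lemma pvFlatten_ne (ra : List (List Char)) (hra : [] ∉ ra) : ra ≠ [] ↔ ra.flatten ≠ [] := by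
  rcases ra with _ | ⟨p, ps⟩
  · simp
  · have hp : p ≠ [] := fun h => hra (by simp [h])
    simp only [ne_eq, reduceCtorEq, not_false_eq_true, true_iff]
    simp only [List.flatten_cons, List.append_eq_nil_iff]
    rintro ⟨h1, _⟩
    exact hp h1

-- shared final step: A's closing "if" equals B's closing "if" once the state correspondence holds
lemma pvFinish (cl rb : List Char) (ra : List (List Char)) (segsb : List (List Char)) (res : List String)
    (hra : [] ∉ ra) (hdec : pvDecodeB cl rb = ra.flatten)
    (hres : res = segsb.map (fun seg => String.ofList (pvDecodeB cl seg))) :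
    (if ra ≠ [] ∨ res = [] then res ++ [String.ofList ra.flatten] else res) = pvOutB cl (segsb, rb) := by
  subst hres
  unfold pvOutB
  simp only [hdec]
  have h2 : ra ≠ [] ↔ (String.ofList ra.flatten ≠ "") := by
    rw [pvFlatten_ne ra hra]; simp
  by_cases h : ra ≠ [] ∨ segsb.map (fun seg => String.ofList (pvDecodeB cl seg)) = []
  · rw [if_pos h, if_pos (by rcases h with h | h; exact Or.inl (h2.mp h); exact Or.inr h)]
  · rw [if_neg h, if_neg (by rintro (hh | hh); exact h (Or.inl (h2.mpr hh)); exact h (Or.inr hh))]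

lemma pvMain (sep cl : List Char) :
    ∀ n cs, cs.length ≤ n → ∀ (rb : List Char) (segsb : List (List Char)) (ra : List (List Char)) (res : List String),
    ([] ∉ ra) →
    (∀ t, pvDecodeB cl (rb ++ t) = ra.flatten ++ pvDecodeB cl t) →
    res = segsb.map (fun seg => String.ofList (pvDecodeB cl seg)) →
    pvLoopA sep cl cs ra res false = pvOutB cl (pvSplitB sep cs rb segsb) := by
  intro n
  induction n with
  | zero =>
    intro cs hcs rb segsb ra res hra hinv hres
    have hnil : cs = [] := List.eq_nil_of_length_eq_zero (Nat.le_zero.mp hcs)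
    subst hnil
    have hrb : pvDecodeB cl rb = ra.flatten := by simpa [pvDec_nil] using hinv []
    simpa only [pvLoopA, pvSplitB] using pvFinish cl rb ra segsb res hra hrb hres
  | succ n ih =>
    intro cs hcs rb segsb ra res hra hinv hres
    rcases cs with _ | ⟨c, cs⟩
    · exact ih [] (Nat.zero_le _) rb segsb ra res hra hinv hres
    by_cases hbs : c = '\\'
    · subst hbs
      rcases cs with _ | ⟨d, cs'⟩
      · -- dangling trailing backslash: A drops it; B keeps it raw and decode drops it
        have hrb : pvDecodeB cl (rb ++ ['\\']) = ra.flatten := by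
          simpa [pvDecodeB] using hinv ['\\']
        have stepA : pvLoopA sep cl ['\\'] ra res false
            = (if ra ≠ [] ∨ res = [] then res ++ [String.ofList ra.flatten] else res) := by
          simp [pvLoopA]
        have stepB : pvSplitB sep ['\\'] rb segsb = (segsb, rb ++ ['\\']) := by
          simp [pvSplitB]
        rw [stepA, stepB]
        exact pvFinish cl (rb ++ ['\\']) ra segsb res hra hrb hres
      · -- escaped pair
        have stepA : pvLoopA sep cl ('\\' :: d :: cs') ra res false
            = pvLoopA sep cl cs' (ra ++ [pvEscA cl d]) res false := by
          simp [pvLoopA]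
        have stepB : pvSplitB sep ('\\' :: d :: cs') rb segsb
            = pvSplitB sep cs' (rb ++ ['\\', d]) segsb := by
          simp [pvSplitB]
        rw [stepA, stepB]
        apply ih cs' (by simp only [List.length_cons] at hcs; omega)
        · intro h
          rcases List.mem_append.mp h with h | h
          · exact hra h
          · simp at h
            exact pvEscA_ne cl d h
        · intro t
          have hx := hinv (['\\', d] ++ t)
          rw [← List.append_assoc] at hx
          rw [hx, List.flatten_append]
          simp [pvDec_esc]
        · exact hres
    · by_cases hsep : [c] = sep
      · have stepA : pvLoopA sep cl (c :: cs) ra res false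
            = pvLoopA sep cl cs [] (res ++ [String.ofList ra.flatten]) false := by
          simp [pvLoopA, hbs, hsep]
        have stepB : pvSplitB sep (c :: cs) rb segsb = pvSplitB sep cs [] (segsb ++ [rb]) := by
          cases cs <;> simp [pvSplitB, hbs, hsep]
        rw [stepA, stepB]
        apply ih cs (Nat.le_of_succ_le_succ hcs)
        · simp
        · intro t; simp
        · have hrb : pvDecodeB cl rb = ra.flatten := by simpa [pvDec_nil] using hinv []
          simp [hres, hrb]
      · have stepA : pvLoopA sep cl (c :: cs) ra res false
            = pvLoopA sep cl cs (ra ++ [[c]]) res false := by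
          simp [pvLoopA, hbs, hsep]
        have stepB : pvSplitB sep (c :: cs) rb segsb = pvSplitB sep cs (rb ++ [c]) segsb := by
          cases cs <;> simp [pvSplitB, hbs, hsep]
        rw [stepA, stepB]
        apply ih cs (Nat.le_of_succ_le_succ hcs)
        · intro h
          rcases List.mem_append.mp h with h | h
          · exact hra h
          · simp at h
        · intro t
          have hx := hinv ([c] ++ t)
          rw [← List.append_assoc] at hx
          rw [hx, List.flatten_append]
          simp [pvDec_cons cl c t hbs]
        · exact hres

-- ===== VERDICT (by name: the statement is the Claim_ definition above) =====
theorem string_to_text_values_spec : Claim_equal_string_to_text_values := by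
  intro s sep cl _
  show _ = _
  unfold string_to_text_values string_to_text_values_alt
  rw [pvMain sep.toList cl.toList s.toList.length s.toList (le_refl _) [] [] [] []
      (by simp) (by intro t; simp) rfl]
  rfl
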